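-- pv_equiv track=rewrite | github.com/tcchenbtx/code_review_practice | MT_num.py | is_valid_index
-- ===== SOURCE A (Python) =====
-- def size(shape, axis=None):
--     """
--     Return the number of elements along a given axis.
--
--     Parameters
--     ----------
--     shape : tuple
--         The shape of the input array
--     axis : int, optional
--         Axis along which the elements are counted.  By default, give
--         the total number of elements.
--
--     Returns
--     -------
--     element_count : int
--         Number of elements along the specified axis.
--
--     Examples
--     --------
--     >>> shape = (2, 3, 2)
--     >>> size(shape)
--     12
--     >>> size(shape, axis=0)
--     2
--     >>> size(shape, axis=1)
--     3
--     """
--     if axis is None: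
--         length = 1
--         for index in shape:
--             length = length * index
--         return length
--     else:
--         return shape[axis]
--
-- def is_valid_index(shape, index):
--     """
--     Check whether the index is compatible with the shape.
--
--     Parameters
--     ----------
--     shape : tuple
--         The shape of the input array
--     index : tuple
--         The position of an element.
--
--     Returns
--     -------
--     valid : bool
--         True is the index is valid for the given shape, False otherwise
--
--     Examples
--     --------
--
--     >>> is_valid_index((2,2), (1,3))
--     False
--     >>> is_valid_index((2,2), (1,1))
--     True
--     """
--     lengthShape = size(shape)
--     offset = 0
--     for i in range(0, len(shape)):
--         Nj = 1
--         for j in range(i + 1, len(shape)):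
--             Nj = Nj * shape[j]
--         offset = offset + Nj * index[i]
--     if offset < lengthShape:
--         return True
--     return False
-- ===== SOURCE B (Python) =====
-- def is_valid_index(shape, index):
--     offset = 0
--     total = 1
--     for i in range(len(shape) - 1, -1, -1):
--         offset += index[i] * total
--         total *= shape[i]
--     return offset < total
-- ===== Notes on version B (the rewrite author's own statement) =====
-- stated objective: faster
-- what changed: Replaces the nested loop that recomputes the suffix product of the shape for every dimension with a single right-to-left pass carrying a running suffix product.
import Mathlib
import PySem

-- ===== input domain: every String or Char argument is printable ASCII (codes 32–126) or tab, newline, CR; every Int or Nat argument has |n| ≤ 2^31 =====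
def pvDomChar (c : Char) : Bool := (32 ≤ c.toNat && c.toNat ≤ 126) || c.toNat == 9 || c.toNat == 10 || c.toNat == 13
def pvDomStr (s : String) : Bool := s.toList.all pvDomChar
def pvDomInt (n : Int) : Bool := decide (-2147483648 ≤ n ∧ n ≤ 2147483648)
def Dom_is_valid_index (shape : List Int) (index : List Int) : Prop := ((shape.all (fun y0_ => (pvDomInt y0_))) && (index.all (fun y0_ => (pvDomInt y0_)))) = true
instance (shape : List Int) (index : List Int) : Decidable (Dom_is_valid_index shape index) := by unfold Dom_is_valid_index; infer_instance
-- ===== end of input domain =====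

-- B replaces A's nested suffix-product recomputation (quadratic in the number of
-- dimensions) by one right-to-left pass carrying a running suffix product (linear).

-- ===== PORT A =====
-- A's `size(shape)` helper with axis=None: length = 1; for index in shape: length *= index.
def pySize (shape : List Int) : Int := shape.foldl (fun length x => length * x) 1

-- Literal transliteration of A: for each i, recompute Nj = product of shape[i+1:]
-- by an inner loop, accumulate offset += Nj * index[i], finally offset < size(shape).
-- pyGetD with default 0: under Pre_ every access is in range, so the default is never read.
def is_valid_index (shape : List Int) (index : List Int) : Bool :=
  let lengthShape := pySize shape
  let offset :=
    (PySem.List.pyRange 0 (PySem.List.len shape)).foldl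
      (fun offset i =>
        let Nj := (PySem.List.pyRange (i + 1) (PySem.List.len shape)).foldl
          (fun Nj j => Nj * PySem.List.pyGetD shape j 0) 1
        offset + Nj * PySem.List.pyGetD index i 0) 0
  decide (offset < lengthShape)

-- ===== PORT B =====
-- B's right-to-left loop: structural recursion computing (offset, total) of the suffix.
def altGo : List Int → List Int → Int × Int
  | [], _ => (0, 1)
  | _ :: _, [] => (0, 1)   -- unreachable under Pre_ (index at least as long as shape)
  | s :: ss, x :: xs =>
      let p := altGo ss xs
      (p.1 + x * p.2, p.2 * s)

def is_valid_index_alt (shape : List Int) (index : List Int) : Bool :=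
  let p := altGo shape index
  decide (p.1 < p.2)

-- ===== PRECONDITION & SPEC =====
-- A raises IndexError (index[i] for i < len(shape)) when index is shorter than shape.
def Pre_is_valid_index (shape : List Int) (index : List Int) : Prop :=
  shape.length ≤ index.length
instance (shape : List Int) (index : List Int) : Decidable (Pre_is_valid_index shape index) := by
  unfold Pre_is_valid_index; infer_instance

def pvWitness_is_valid_index : List Int × List Int := ([2, 3, 2], [1, 2, 0])

def Spec_is_valid_index (shape : List Int) (index : List Int) (out : Bool) : Prop := out = is_valid_index_alt shape index
instance (shape : List Int) (index : List Int) (out : Bool) : Decidable (Spec_is_valid_index shape index out) := by unfold Spec_is_valid_index; infer_instance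

-- ===== CLAIM (what is proved, stated in full; the proofs are below) =====
def Claim_equal_is_valid_index : Prop := ∀ (shape : List Int) (index : List Int), Dom_is_valid_index shape index → Pre_is_valid_index shape index → Spec_is_valid_index shape index (is_valid_index shape index)

-- ===== LEMMAS AND PROOFS =====

-- the offset both programs compute, as a structural recursion
def offSpec : List Int → List Int → Int
  | [], _ => 0
  | _ :: _, [] => 0
  | _ :: ss, x :: xs => x * ss.prod + offSpec ss xs

theorem pySize_eq_prod (shape : List Int) : pySize shape = shape.prod := by
  have h : ∀ (l : List Int) (c : Int), l.foldl (fun a x => a * x) c = c * l.prod := by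
    intro l
    induction l with
    | nil => simp
    | cons y ys ih => intro c; simp [List.foldl, ih, List.prod_cons]; ring
  simpa using h shape 1

theorem altGo_eq (shape index : List Int) (h : shape.length ≤ index.length) :
    altGo shape index = (offSpec shape index, shape.prod) := by
  induction shape generalizing index with
  | nil => simp [altGo, offSpec]
  | cons s ss ih =>
    cases index with
    | nil => simp at h
    | cons x xs =>
      simp only [altGo, offSpec, ih xs (by simpa using h), List.prod_cons]
      exact Prod.ext (by ring) (by ring)

theorem inner_eq (shape : List Int) (a : Nat) (c : Int) :
    (PySem.List.pyRange (↑a) (PySem.List.len shape)).foldl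
      (fun Nj j => Nj * PySem.List.pyGetD shape j 0) c = c * (shape.drop a).prod := by
  by_cases hlt : a < shape.length
  · have hcons : PySem.List.pyRange (↑a) (PySem.List.len shape) =
        (↑a) :: PySem.List.pyRange ((↑a : Int) + 1) (PySem.List.len shape) := by
      apply PySem.List.pyRange_one_cons
      simp [PySem.List.len]; exact_mod_cast hlt
    have hget : PySem.List.pyGetD shape (↑a) 0 = shape[a] := by
      rw [PySem.List.pyGetD_eq_getElem shape 0 (by positivity) (by exact_mod_cast hlt)]
      simp
    have hdrop : shape.drop a = shape[a] :: shape.drop (a + 1) :=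
      List.drop_eq_getElem_cons hlt
    have := inner_eq shape (a + 1) (c * shape[a])
    rw [hcons]
    simp only [List.foldl, hget]
    rw [show ((↑a : Int) + 1) = ((↑(a + 1) : Nat) : Int) by push_cast; ring, this, hdrop,
      List.prod_cons]
    ring
  · have hnil : PySem.List.pyRange (↑a) (PySem.List.len shape) = [] := by
      rw [List.eq_nil_iff_forall_not_mem]
      intro y hy
      rw [PySem.List.mem_pyRange_one] at hy
      simp [PySem.List.len] at hy
      omega
    rw [hnil, List.drop_eq_nil_of_le (by omega)]
    simp
termination_by shape.length - a

theorem sum_eq_offSpec (shape index : List Int) (h : shape.length ≤ index.length) :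
    ((List.range shape.length).map
      (fun k => (shape.drop (k + 1)).prod * index.getD k 0)).sum = offSpec shape index := by
  induction shape generalizing index with
  | nil => simp [offSpec]
  | cons s ss ih =>
    cases index with
    | nil => simp at h
    | cons x xs =>
      rw [List.length_cons, List.range_succ_eq_map]
      simp only [List.map_cons, List.map_map, List.sum_cons, offSpec]
      have hmap : ∀ k ∈ List.range ss.length,
          ((fun k => (List.drop k ss).prod * (x :: xs)[k]?.getD 0) ∘ Nat.succ) k
            = (fun k => (List.drop (k + 1) ss).prod * xs[k]?.getD 0) k := by
        intro k _; simp [Function.comp]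
      rw [← ih xs (by simpa using h)]
      simp [mul_comm]
      rw [List.map_congr_left hmap]

theorem offset_eq (shape index : List Int) (h : shape.length ≤ index.length) :
    (PySem.List.pyRange 0 (PySem.List.len shape)).foldl
      (fun offset i =>
        offset + ((PySem.List.pyRange (i + 1) (PySem.List.len shape)).foldl
          (fun Nj j => Nj * PySem.List.pyGetD shape j 0) 1) * PySem.List.pyGetD index i 0) 0
      = offSpec shape index := by
  rw [PySem.List.foldl_add]
  have hlen : PySem.List.len shape = ((shape.length : Nat) : Int) := by
    simp [PySem.List.len]
  rw [hlen, PySem.List.pyRange_zero_natCast, List.map_map]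
  rw [← sum_eq_offSpec shape index h]
  simp only [zero_add]
  congr 1
  apply List.map_congr_left
  intro k hk
  simp only [Function.comp]
  rw [show ((↑k : Int) + 1) = ((↑(k + 1) : Nat) : Int) by push_cast; ring, ← hlen,
    inner_eq shape (k + 1) 1, PySem.List.pyGetD_natCast]
  ring_nf

-- ===== VERDICT (by name: the statement is the Claim_ definition above) =====
theorem is_valid_index_spec : Claim_equal_is_valid_index := by
  intro shape index _ hpre
  unfold Spec_is_valid_index is_valid_index is_valid_index_alt
  rw [altGo_eq shape index hpre]
  simp only [pySize_eq_prod, offset_eq shape index hpre]
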